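-- pv_equiv track=rewrite | github.com/Tri-M/DATA-MINING-PACKAGE | HUIM.py | reduce_algorithm
-- ===== SOURCE A (Python) =====
-- def su(transaction, item):
--     support_utility = 0
--     for t_item, quantity in transaction:
--         if t_item == item:
--             support_utility += quantity
--     return support_utility
--
-- def create_D_star(alpha, transaction_database):
--     D_star = {}
--     for tid, transaction in transaction_database.items():
--         items = [item for item, _ in transaction]
--         if set(alpha).issubset(set(items)):
--             D_star[tid] = transaction
--     return D_star
--
-- def Search(alpha, D_star, primary, secondary, min_util):
--     HUIs = set()
--     for tid, transaction in D_star.items():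
--         total_utility = sum(su(transaction, item) for item, _ in transaction)
--         if total_utility >= min_util:
--             HUIs.add(tid)
--     return HUIs
--
-- primary = {'a', 'b', 'c'}
--
-- secondary = {'d', 'e', 'f', 'g'}
--
-- def reduce_algorithm(transaction_database, key, min_util):
--     # Initialize alpha with the key
--     alpha = set(key)
--     huis = set()  # Initialize set to store the High Utility Itemsets (HUIs)
--
--     # Sort transactions in D according to some order (≻)
--     sorted_transactions = sorted(transaction_database.items())
--
--     # Create D* for the initial alpha
--     D_star = create_D_star(alpha, transaction_database)
--
--     # Search for High Utility Itemsets using the initial alpha and D*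
--     HUIs = Search(alpha, D_star, primary, secondary, min_util)
--
--     # Add the initial HUIs to the final set
--     huis.update(HUIs)
--
--     # Iterate through remaining transactions
--     for transaction_id, _ in sorted_transactions:
--         # Skip if the transaction is already in alpha
--         if transaction_id in alpha:
--             continue
--
--         # Add the transaction ID to alpha
--         alpha.add(transaction_id)
--
--         # Update D* according to the new alpha
--         D_star = create_D_star(alpha, transaction_database)
--
--         # Search for High Utility Itemsets using the updated alpha and D*
--         HUIs = Search(alpha, D_star, primary, secondary, min_util)
--
--         # Add the found HUIs to the final set
--         huis.update(HUIs)
--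
--     return huis
-- ===== SOURCE B (Python) =====
-- def su(transaction, item):
--     support_utility = 0
--     for t_item, quantity in transaction:
--         if t_item == item:
--             support_utility += quantity
--     return support_utility
--
-- def reduce_algorithm(transaction_database, key, min_util):
--     # Every later iteration of A searches a shrunken D*, so the union of all
--     # searches equals the very first Search: one pass over the database suffices.
--     alpha = set(key)
--     return {tid for tid, transaction in transaction_database.items()
--             if alpha.issubset({item for item, _ in transaction})
--             and sum(su(transaction, item) for item, _ in transaction) >= min_util}
-- ===== Notes on version B (the rewrite author's own statement) =====
-- stated objective: faster
-- what changed: A re-sorts the database and recomputes create_D_star+Search for every transaction id added to alpha; since each later search runs over a subset of the first D* with an alpha-independent utility test, its results are already in the first Search's result, so B does a single pass over the database and collects qualifying tids once.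
import Mathlib
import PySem

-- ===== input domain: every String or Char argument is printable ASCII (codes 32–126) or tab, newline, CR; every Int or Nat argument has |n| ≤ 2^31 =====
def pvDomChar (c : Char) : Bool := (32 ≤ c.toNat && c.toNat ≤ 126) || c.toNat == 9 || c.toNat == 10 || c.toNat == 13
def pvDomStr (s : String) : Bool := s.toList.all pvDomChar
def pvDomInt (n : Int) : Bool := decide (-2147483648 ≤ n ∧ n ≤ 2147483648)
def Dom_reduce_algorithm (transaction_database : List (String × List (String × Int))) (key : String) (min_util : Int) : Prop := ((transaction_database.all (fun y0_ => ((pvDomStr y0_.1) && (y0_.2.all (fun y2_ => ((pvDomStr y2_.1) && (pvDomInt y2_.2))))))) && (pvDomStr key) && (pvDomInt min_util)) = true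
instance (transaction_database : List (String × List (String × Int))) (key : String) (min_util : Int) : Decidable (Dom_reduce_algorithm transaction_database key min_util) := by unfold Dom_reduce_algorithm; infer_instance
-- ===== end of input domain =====

-- B drops A's redundant outer loop: every later Search runs over a subset of the first D* with an
-- alpha-independent utility test, so the union A accumulates equals the first Search; one pass suffices (asymptotically faster).

-- ===== PORT A =====
-- su(transaction, item)
def pySu (transaction : List (String × Int)) (item : String) : Int :=
  transaction.foldl (fun acc p => if p.1 == item then acc + p.2 else acc) 0

-- set(alpha).issubset(set(items)) test of create_D_star
def pySubCond (alpha : PySem.Set String) (transaction : List (String × Int)) : Bool :=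
  PySem.Set.issubset (PySem.Set.ofList alpha) (PySem.Set.ofList (transaction.map (·.1)))

-- create_D_star(alpha, transaction_database)
def pyCreateDStar (alpha : PySem.Set String) (d : PySem.Dict String (List (String × Int))) :
    PySem.Dict String (List (String × Int)) :=
  d.items.foldl
    (fun D p => if pySubCond alpha p.2 then D.insert p.1 p.2 else D)
    PySem.Dict.empty

-- total_utility of the Search loop body
def pyTotalUtil (transaction : List (String × Int)) : Int :=
  (transaction.map (fun p => pySu transaction p.1)).sum

-- Search(alpha, D_star, primary, secondary, min_util)  (primary/secondary are unused by the Python body)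
def pySearch (alpha : PySem.Set String) (D_star : PySem.Dict String (List (String × Int)))
    (primary secondary : PySem.Set String) (min_util : Int) : PySem.Set String :=
  D_star.items.foldl
    (fun H p => if decide (min_util ≤ pyTotalUtil p.2) then PySem.Set.add H p.1 else H)
    PySem.Set.empty

def pyPrimary : PySem.Set String := PySem.Set.ofList ["a", "b", "c"]

def pySecondary : PySem.Set String := PySem.Set.ofList ["d", "e", "f", "g"]

def reduce_algorithm (transaction_database : List (String × List (String × Int))) (key : String) (min_util : Int) : List String :=
  let d := PySem.Dict.ofList transaction_database
  let alpha := PySem.Set.ofList (key.toList.map (fun c => String.singleton c))  -- set(key): the characters of key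
  -- sorted(transaction_database.items()): dict keys are unique, so Python's tuple comparison
  -- never reaches the second components; sorting by the key string is the same order.
  let sorted_transactions := PySem.List.sorted d.items (fun p => p.1) false
  let D_star := pyCreateDStar alpha d
  let HUIs := pySearch alpha D_star pyPrimary pySecondary min_util
  let huis := PySem.Set.update PySem.Set.empty HUIs
  (sorted_transactions.foldl
    (fun (st : PySem.Set String × PySem.Set String) p =>
      if PySem.Set.contains st.1 p.1 then st
      else
        let alpha' := PySem.Set.add st.1 p.1
        let D' := pyCreateDStar alpha' d
        let H' := pySearch alpha' D' pyPrimary pySecondary min_util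
        (alpha', PySem.Set.update st.2 H'))
    (alpha, huis)).2

-- ===== PORT B =====
-- the combined filter of B's single set comprehension
def altCond (alpha : PySem.Set String) (min_util : Int) (transaction : List (String × Int)) : Bool :=
  PySem.Set.issubset alpha (PySem.Set.ofList (transaction.map (·.1))) &&
    decide (min_util ≤ (transaction.map (fun p => pySu transaction p.1)).sum)

def reduce_algorithm_alt (transaction_database : List (String × List (String × Int))) (key : String) (min_util : Int) : List String :=
  let alpha := PySem.Set.ofList (key.toList.map (fun c => String.singleton c))
  PySem.Set.ofList
    (((PySem.Dict.ofList transaction_database).items.filter (fun p => altCond alpha min_util p.2)).map (·.1))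

-- ===== PRECONDITION & SPEC =====
def Spec_reduce_algorithm (transaction_database : List (String × List (String × Int))) (key : String) (min_util : Int) (out : List String) : Prop := out = reduce_algorithm_alt transaction_database key min_util
instance (transaction_database : List (String × List (String × Int))) (key : String) (min_util : Int) (out : List String) : Decidable (Spec_reduce_algorithm transaction_database key min_util out) := by unfold Spec_reduce_algorithm; infer_instance

-- ===== CLAIM (what is proved, stated in full; the proofs are below) =====
def Claim_equal_reduce_algorithm : Prop := ∀ (transaction_database : List (String × List (String × Int))) (key : String) (min_util : Int), Dom_reduce_algorithm transaction_database key min_util → Spec_reduce_algorithm transaction_database key min_util (reduce_algorithm transaction_database key min_util)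

-- ===== LEMMAS AND PROOFS =====

-- create_D_star over a fresh-keyed nodup-key item list is a filter
theorem items_createDStar_aux (alpha : PySem.Set String)
    (l : List (String × List (String × Int))) :
    ∀ d : PySem.Dict String (List (String × Int)),
      (l.map (·.1)).Nodup → (∀ p ∈ l, d.contains p.1 = false) →
      (l.foldl (fun D p => if pySubCond alpha p.2 then D.insert p.1 p.2 else D) d).items
        = d.items ++ l.filter (fun p => pySubCond alpha p.2) := by
  induction l with
  | nil => intro d _ _; simp
  | cons p l ih =>
    intro d hnd hfresh
    simp only [List.map_cons, List.nodup_cons, List.mem_map] at hnd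
    by_cases hc : pySubCond alpha p.2 = true
    · have hfresh' : d.contains p.1 = false := hfresh p (by simp)
      have hstep : (d.insert p.1 p.2).items = d.items ++ [p] :=
        PySem.Dict.items_insert_of_not_contains d p.2 hfresh'
      have hfr2 : ∀ q ∈ l, (d.insert p.1 p.2).contains q.1 = false := by
        intro q hq
        have hne : q.1 ≠ p.1 := fun h => hnd.1 ⟨q, hq, h⟩
        have hq2 := hfresh q (by simp [hq])
        simp [PySem.Dict.contains_insert, hq2]
        exact fun h => absurd (by exact_mod_cast h) hne
      simp only [List.foldl_cons, List.filter_cons, hc, if_true]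
      rw [ih (d.insert p.1 p.2) hnd.2 hfr2, hstep]
      simp
    · simp only [List.foldl_cons, List.filter_cons, hc, Bool.false_eq_true, if_false]
      exact ih d hnd.2 (fun q hq => hfresh q (by simp [hq]))

theorem items_createDStar (alpha : PySem.Set String) (d : PySem.Dict String (List (String × Int)))
    (hnd : d.keys.Nodup) :
    (pyCreateDStar alpha d).items = d.items.filter (fun p => pySubCond alpha p.2) := by
  have := items_createDStar_aux alpha d.items PySem.Dict.empty hnd (by intro p _; simp [pysem])
  simpa [pyCreateDStar, PySem.Dict.empty] using this

-- a conditional Set.add fold is an update with the filtered keys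
theorem foldl_if_add (q : (String × List (String × Int)) → Bool)
    (l : List (String × List (String × Int))) :
    ∀ s : PySem.Set String,
      (l.foldl (fun H p => if q p then PySem.Set.add H p.1 else H) s)
        = PySem.Set.update s ((l.filter q).map (·.1)) := by
  induction l with
  | nil => intro s; simp [PySem.Set.update]
  | cons p l ih =>
    intro s
    by_cases hq : q p = true
    · simp only [List.foldl_cons, List.filter_cons, hq, if_true, List.map_cons]
      rw [ih, PySem.Set.update_cons]
    · simp only [List.foldl_cons, List.filter_cons, hq, Bool.false_eq_true, if_false]
      rw [ih]

theorem search_eq_ofList (alpha : PySem.Set String) (D : PySem.Dict String (List (String × Int)))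
    (pr se : PySem.Set String) (m : Int) :
    pySearch alpha D pr se m
      = PySem.Set.ofList ((D.items.filter (fun p => decide (m ≤ pyTotalUtil p.2))).map (·.1)) := by
  rw [pySearch, foldl_if_add]
  rfl

-- updating with elements already present changes nothing
theorem update_of_subset (s t : PySem.Set String) (h : ∀ x ∈ t, x ∈ s) :
    PySem.Set.update s t = s := by
  rw [PySem.Set.update_eq_append_filter]
  have : (PySem.Set.ofList t).filter (fun y => !(PySem.Set.contains s y)) = [] := by
    rw [List.filter_eq_nil_iff]
    intro x hx
    have hxs : x ∈ s := h x ((PySem.Set.mem_ofList t x).1 hx)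
    simpa using hxs
  rw [this, List.append_nil]

-- membership in a later Search implies membership in the initial one
theorem mem_search_mono (d : PySem.Dict String (List (String × Int))) (hnd : d.keys.Nodup)
    (alpha0 alpha : PySem.Set String) (hsub : ∀ x ∈ alpha0, x ∈ alpha) (m : Int) (x : String)
    (hx : x ∈ pySearch alpha (pyCreateDStar alpha d) pyPrimary pySecondary m) :
    x ∈ pySearch alpha0 (pyCreateDStar alpha0 d) pyPrimary pySecondary m := by
  rw [search_eq_ofList, items_createDStar alpha d hnd, PySem.Set.mem_ofList _ x] at hx
  rw [search_eq_ofList, items_createDStar alpha0 d hnd, PySem.Set.mem_ofList _ x]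
  rcases List.mem_map.1 hx with ⟨p, hp, hpx⟩
  rcases List.mem_filter.1 hp with ⟨hp1, hutil⟩
  rcases List.mem_filter.1 hp1 with ⟨hpd, hsubc⟩
  refine List.mem_map.2 ⟨p, List.mem_filter.2 ⟨List.mem_filter.2 ⟨hpd, ?_⟩, hutil⟩, hpx⟩
  -- pySubCond alpha p.2 → pySubCond alpha0 p.2  since alpha0 ⊆ alpha
  rw [pySubCond] at hsubc ⊢
  rw [PySem.Set.issubset_iff] at hsubc ⊢
  intro y hy
  exact hsubc y ((PySem.Set.mem_ofList _ y).2 (hsub y ((PySem.Set.mem_ofList _ y).1 hy)))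

-- the loop invariant: alpha only grows, huis never changes
theorem loop_invariant (d : PySem.Dict String (List (String × Int))) (hnd : d.keys.Nodup)
    (alpha0 : PySem.Set String) (m : Int) (S0 : PySem.Set String)
    (hS0 : ∀ x, x ∈ pySearch alpha0 (pyCreateDStar alpha0 d) pyPrimary pySecondary m → x ∈ S0)
    (l : List (String × List (String × Int))) :
    ∀ (st : PySem.Set String × PySem.Set String),
      (∀ x ∈ alpha0, x ∈ st.1) → st.2 = S0 →
      (l.foldl
        (fun (st : PySem.Set String × PySem.Set String) p =>
          if PySem.Set.contains st.1 p.1 then st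
          else
            let alpha' := PySem.Set.add st.1 p.1
            let D' := pyCreateDStar alpha' d
            let H' := pySearch alpha' D' pyPrimary pySecondary m
            (alpha', PySem.Set.update st.2 H'))
        st).2 = S0 := by
  induction l with
  | nil => intro st _ h2; simpa using h2
  | cons p l ih =>
    intro st h1 h2
    simp only [List.foldl_cons]
    by_cases hc : PySem.Set.contains st.1 p.1 = true
    · rw [if_pos hc]; exact ih st h1 h2
    · rw [if_neg hc]
      refine ih _ ?_ ?_
      · intro x hx
        exact (PySem.Set.mem_add _ _ x).2 (Or.inl (h1 x hx))
      · show PySem.Set.update st.2 _ = S0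
        rw [h2]
        refine update_of_subset _ _ ?_
        intro x hx
        refine hS0 x (mem_search_mono d hnd alpha0 _ ?_ m x hx)
        intro y hy
        exact (PySem.Set.mem_add _ _ y).2 (Or.inl (h1 y hy))

-- ===== VERDICT (by name: the statement is the Claim_ definition above) =====
theorem reduce_algorithm_spec : Claim_equal_reduce_algorithm := by
  intro db key m _
  show reduce_algorithm db key m = reduce_algorithm_alt db key m
  rw [reduce_algorithm, reduce_algorithm_alt]
  set d := PySem.Dict.ofList db with hd
  have hnd : d.keys.Nodup := PySem.Dict.nodup_keys_ofList db
  set alpha0 := PySem.Set.ofList (key.toList.map (fun c => String.singleton c)) with ha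
  set S0 := pySearch alpha0 (pyCreateDStar alpha0 d) pyPrimary pySecondary m with hS0def
  -- the initial huis equals S0 (S0 is already a nodup set)
  have hnodup : S0.Nodup := by
    rw [hS0def, search_eq_ofList]
    exact PySem.Set.nodup_ofList _
  have hinit : PySem.Set.update PySem.Set.empty S0 = S0 :=
    (PySem.Set.update_nil_left S0).trans (PySem.Set.ofList_eq_self_of_nodup S0 hnodup)
  simp only
  rw [hinit]
  -- the fold leaves huis at S0
  rw [loop_invariant d hnd alpha0 m S0 (fun x hx => hx) _ (alpha0, S0) (fun x hx => hx) rfl]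
  -- S0 is exactly B's value
  rw [hS0def, search_eq_ofList, items_createDStar alpha0 d hnd, List.filter_filter]
  have hfc : List.filter (fun a => decide (m ≤ pyTotalUtil a.2) && pySubCond alpha0 a.2) d.items
      = List.filter (fun p => altCond alpha0 m p.2) d.items := by
    apply List.filter_congr
    intro p _
    simp only [altCond, pySubCond, pyTotalUtil, Bool.and_comm]
    rw [ha, PySem.Set.ofList_ofList]
    rfl
  rw [hfc]
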